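-- pv_equiv track=rewrite | github.com/cp4011/Algorithms | Examination/2_万万没想到之抓捕孔连顺.py | func
-- ===== SOURCE A (Python) =====
-- def func(arr, d):
--     from itertools import combinations
--     c = combinations(arr, 3)
--     ans = []
--     for i in c:
--         if i[2] - i[0] <= d:
--             ans.append(i)
--     return len(ans) % 99997867
-- ===== SOURCE B (Python) =====
-- def func(arr, d):
--     # Count index-ordered triples (i<j<k) with arr[k]-arr[i] <= d.
--     # The middle element is unconstrained, so each valid (i,k) pair with
--     # k-i-1 elements between them contributes k-i-1 triples: one O(n^2)
--     # pass over pairs replaces the O(n^3) enumeration of triples.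
--     total = 0
--     for i, x in enumerate(arr):
--         gap = 0
--         for y in arr[i + 1:]:
--             if y - x <= d:
--                 total += gap
--             gap += 1
--     return total % 99997867
-- ===== Notes on version B (the rewrite author's own statement) =====
-- stated objective: faster
-- what changed: Instead of enumerating all C(n,3) triples and filtering, B iterates over pairs (i,k) only and adds k-i-1 (the number of possible middle elements) whenever arr[k]-arr[i] <= d, since the middle element is unconstrained.
import Mathlib
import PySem

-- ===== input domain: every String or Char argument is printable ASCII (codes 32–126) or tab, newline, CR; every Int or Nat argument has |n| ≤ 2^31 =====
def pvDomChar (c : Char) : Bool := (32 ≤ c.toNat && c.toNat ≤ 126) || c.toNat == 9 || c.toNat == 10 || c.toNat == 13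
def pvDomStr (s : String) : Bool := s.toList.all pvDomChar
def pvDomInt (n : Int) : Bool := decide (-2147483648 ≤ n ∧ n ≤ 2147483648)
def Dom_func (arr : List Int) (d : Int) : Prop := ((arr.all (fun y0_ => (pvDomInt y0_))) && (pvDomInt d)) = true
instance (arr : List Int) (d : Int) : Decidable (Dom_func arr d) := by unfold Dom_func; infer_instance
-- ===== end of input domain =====

-- B replaces A's O(n^3) enumeration of all triples by an O(n^2) pass over
-- (first,third) pairs, adding the number of possible middle elements.

-- ===== PORT A =====
-- itertools.combinations(arr, 2): all index-ordered pairs, lexicographic by index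
def comb2 : List Int → List (Int × Int)
  | [] => []
  | x :: xs => xs.map (fun y => (x, y)) ++ comb2 xs

-- itertools.combinations(arr, 3): all index-ordered triples, lexicographic by index
def comb3 : List Int → List (Int × Int × Int)
  | [] => []
  | x :: xs => (comb2 xs).map (fun p => (x, p.1, p.2)) ++ comb3 xs

def func (arr : List Int) (d : Int) : Int :=
  -- ans = [i for i in combinations(arr,3) if i[2]-i[0] <= d]; len(ans) % 99997867
  let ans := (comb3 arr).filter (fun t => decide (t.2.2 - t.1 ≤ d))
  PySem.Int.mod (ans.length : Int) 99997867

-- ===== PORT B =====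
-- inner loop: for y in the suffix after x, gap counts elements between x and y
def innerSum (x d : Int) : List Int → Int → Int
  | [], _ => 0
  | y :: ys, gap => (if y - x ≤ d then gap else 0) + innerSum x d ys (gap + 1)

def pairTotal (d : Int) : List Int → Int
  | [] => 0
  | x :: xs => innerSum x d xs 0 + pairTotal d xs

def func_alt (arr : List Int) (d : Int) : Int :=
  PySem.Int.mod (pairTotal d arr) 99997867

-- ===== PRECONDITION & SPEC =====
def Spec_func (arr : List Int) (d : Int) (out : Int) : Prop := out = func_alt arr d
instance (arr : List Int) (d : Int) (out : Int) : Decidable (Spec_func arr d out) := by unfold Spec_func; infer_instance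

-- ===== CLAIM (what is proved, stated in full; the proofs are below) =====
def Claim_equal_func : Prop := ∀ (arr : List Int) (d : Int), Dom_func arr d → Spec_func arr d (func arr d)

-- ===== LEMMAS AND PROOFS =====

-- innerSum with starting gap g: filtered count weighted by position, shifted by g per hit
theorem innerSum_eq (x d : Int) (xs : List Int) (g : Int) :
    innerSum x d xs g =
      ((comb2 xs).countP (fun p => decide (p.2 - x ≤ d)) : Int)
        + g * (xs.countP (fun y => decide (y - x ≤ d)) : Int) := by
  induction xs generalizing g with
  | nil => simp [innerSum, comb2]
  | cons y ys ih =>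
    simp only [innerSum, comb2, List.countP_append, List.countP_map, List.countP_cons, ih]
    have hcc : (ys.countP ((fun p => decide (p.2 - x ≤ d)) ∘ (fun z => (y, z))))
        = ys.countP (fun z => decide (z - x ≤ d)) := by
      apply List.countP_congr; intro a _; simp
    rw [hcc]
    by_cases h : y - x ≤ d
    · simp [h]; ring
    · simp [h]; ring

theorem pairTotal_eq (d : Int) (arr : List Int) :
    pairTotal d arr = ((comb3 arr).countP (fun t => decide (t.2.2 - t.1 ≤ d)) : Int) := by
  induction arr with
  | nil => simp [pairTotal, comb3]
  | cons x xs ih =>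
    simp only [pairTotal, comb3, List.countP_append, List.countP_map, ih, innerSum_eq]
    have : ((comb2 xs).countP ((fun t => decide (t.2.2 - t.1 ≤ d)) ∘ (fun p => (x, p.1, p.2))))
        = (comb2 xs).countP (fun p => decide (p.2 - x ≤ d)) := by
      apply List.countP_congr; intro a _; simp
    rw [this]; push_cast; ring

-- ===== VERDICT (by name: the statement is the Claim_ definition above) =====
theorem func_spec : Claim_equal_func := by
  intro arr d _
  unfold Spec_func func func_alt
  simp [pairTotal_eq, List.countP_eq_length_filter]
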